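-- pv_equiv track=rewrite | github.com/nmallar/scaler | hashing/assignments/advcountrectangles.py | solve
-- ===== SOURCE A (Python) =====
-- from collections import OrderedDict
--
-- def solve(A, B):
--     od=OrderedDict()
--     for i in range(len(A)):
--         od[(A[i],B[i])]=1
--
--     count=0
--     for i in range(len(A)):
--         for j in range(i+1,len(A)):
--             (x1,y1)=A[i],B[i]
--             (x2,y2)=A[j],B[j]
--
--             if x1==x2 or y1==y2:
--                 continue
--             if (x2,y1) in od and (x1,y2) in od:
--                 count=count+1
--     return int(count/2)
-- ===== SOURCE B (Python) =====
-- def solve(A, B):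
--     # group points by column (x -> set of ys), then count, for every unordered
--     # pair of ys, in how many columns it occurs; each pair of such columns is
--     # one rectangle: answer = sum over y-pairs of C(count, 2).
--     cols = {}
--     for x, y in zip(A, B):
--         cols.setdefault(x, set()).add(y)
--     pair_cnt = {}
--     for ys in cols.values():
--         ys = sorted(ys)
--         for i in range(len(ys)):
--             for j in range(i + 1, len(ys)):
--                 p = (ys[i], ys[j])
--                 pair_cnt[p] = pair_cnt.get(p, 0) + 1
--     return sum(c * (c - 1) // 2 for c in pair_cnt.values())
-- ===== Notes on version B (the rewrite author's own statement) =====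
-- stated objective: faster
-- what changed: A scans all O(n^2) point pairs and tests the two opposite corners via a dict, halving the count at the end; B groups points by column, enumerates each column's distinct y-pairs once into a shared-pair counter and returns the sum of C(k,2), so no cross-point pair scan remains.
-- outside the precondition, e.g. on solve([0, 1, 0, 1, 0, 0], [0, 1, 1, 0, 0, 0]): A returns 2, B returns 1
import Mathlib
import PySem

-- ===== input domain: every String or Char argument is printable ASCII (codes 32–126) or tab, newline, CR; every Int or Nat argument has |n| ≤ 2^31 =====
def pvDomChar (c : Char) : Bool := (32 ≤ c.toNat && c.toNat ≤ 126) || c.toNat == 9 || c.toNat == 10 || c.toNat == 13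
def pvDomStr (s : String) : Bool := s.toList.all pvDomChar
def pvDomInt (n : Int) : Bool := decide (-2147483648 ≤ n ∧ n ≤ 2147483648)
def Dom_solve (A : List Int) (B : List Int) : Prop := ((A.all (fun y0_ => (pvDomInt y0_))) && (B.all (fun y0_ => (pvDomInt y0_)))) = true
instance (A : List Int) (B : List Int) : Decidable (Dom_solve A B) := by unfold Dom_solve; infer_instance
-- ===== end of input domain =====

-- B replaces A's O(n^2) scan over point pairs by column-grouping with a shared
-- y-pair counter (sum of C(k,2)); proved equal to A on length-compatible,
-- duplicate-free point lists.


-- ===== PORT A =====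
-- literal port of Source A: od dict of points, double index loop, int(count/2)
-- (count ≥ 0, so int(count/2) is floor division; B[i] ported totally via a
-- default that is never read under Pre_solve).
def solve (A : List Int) (B : List Int) : Int :=
  let n : Int := PySem.List.len A
  let od : PySem.Dict (Int × Int) Int :=
    (PySem.List.pyRange 0 n 1).foldl
      (fun od i => od.insert (PySem.List.pyGetD A i 0, PySem.List.pyGetD B i 0) 1)
      PySem.Dict.empty
  let count : Int :=
    (PySem.List.pyRange 0 n 1).foldl (fun count i =>
      (PySem.List.pyRange (i + 1) n 1).foldl (fun count j =>
        let x1 := PySem.List.pyGetD A i 0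
        let y1 := PySem.List.pyGetD B i 0
        let x2 := PySem.List.pyGetD A j 0
        let y2 := PySem.List.pyGetD B j 0
        if x1 = x2 ∨ y1 = y2 then count
        else if od.contains (x2, y1) && od.contains (x1, y2) then count + 1
        else count) count) 0
  PySem.Int.floordiv count 2

-- ===== PORT B =====
-- literal port of Source B: cols.setdefault(x, set()).add(y) is exactly
-- Dict.modify x empty-set (add · y); sum(...) over values is a fold.
def solve_alt (A : List Int) (B : List Int) : Int :=
  let cols : PySem.Dict Int (PySem.Set Int) :=
    (A.zip B).foldl
      (fun d p => d.modify p.1 PySem.Set.empty (fun s => PySem.Set.add s p.2))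
      PySem.Dict.empty
  let paircnt : PySem.Dict (Int × Int) Int :=
    cols.values.foldl (fun pc ys =>
      let ysl := PySem.List.sorted ys (fun y => y) false
      let m : Int := PySem.List.len ysl
      (PySem.List.pyRange 0 m 1).foldl (fun pc i =>
        (PySem.List.pyRange (i + 1) m 1).foldl (fun pc j =>
          let p := (PySem.List.pyGetD ysl i 0, PySem.List.pyGetD ysl j 0)
          pc.insert p (pc.getD p 0 + 1)) pc) pc)
      PySem.Dict.empty
  paircnt.values.foldl (fun acc c => acc + PySem.Int.floordiv (c * (c - 1)) 2) 0

-- ===== PRECONDITION & SPEC =====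
-- Pre_ excludes (a) len(B) < len(A), where A raises IndexError, and
-- (b) duplicated points, a defensible corner on which A's index-pair count
-- weights repeated corners and B's deduplicating grouping counts geometric
-- rectangles once.
def Pre_solve (A : List Int) (B : List Int) : Prop :=
  A.length ≤ B.length ∧ (A.zip B).Nodup
instance (A : List Int) (B : List Int) : Decidable (Pre_solve A B) := by
  unfold Pre_solve; infer_instance

def pvWitness_solve : List Int × List Int := ([0, 1, 0, 1], [0, 1, 1, 0])

def Spec_solve (A : List Int) (B : List Int) (out : Int) : Prop := out = solve_alt A B
instance (A : List Int) (B : List Int) (out : Int) : Decidable (Spec_solve A B out) := by unfold Spec_solve; infer_instance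

-- ===== CLAIM (what is proved, stated in full; the proofs are below) =====
def Claim_equal_solve : Prop := ∀ (A : List Int) (B : List Int), Dom_solve A B → Pre_solve A B → Spec_solve A B (solve A B)

-- ===== LEMMAS AND PROOFS =====

def pairsList {α : Type} : List α → List (α × α)
  | [] => []
  | x :: xs => xs.map (fun y => (x, y)) ++ pairsList xs

theorem nat_loop_eq_pairsList {α β : Type} (g : β → α × α → β) (d : α) :
    ∀ (l : List α) (init : β),
    (List.range l.length).foldl
      (fun acc k => (l.drop (k+1)).foldl (fun acc y => g acc (l.getD k d, y)) acc) init
    = (pairsList l).foldl g init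
  | [], init => by simp [pairsList]
  | x :: xs, init => by
    rw [List.length_cons, List.range_succ_eq_map, List.foldl_cons, List.foldl_map]
    simp only [List.drop_succ_cons, List.getD_cons_succ, List.getD_cons_zero, List.drop_zero]
    rw [nat_loop_eq_pairsList g d xs]
    simp [pairsList, List.foldl_append, List.foldl_map]

theorem double_index_loop {α β : Type} (l : List α) (g : β → α × α → β) (init : β) (d : α) :
    (PySem.List.pyRange 0 (PySem.List.len l) 1).foldl
      (fun acc i => (PySem.List.pyRange (i + 1) (PySem.List.len l) 1).foldl
        (fun acc j => g acc (PySem.List.pyGetD l i d, PySem.List.pyGetD l j d)) acc) init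
    = (pairsList l).foldl g init := by
  rw [PySem.List.len_eq, PySem.List.pyRange_one]
  simp only [Int.sub_zero, Int.toNat_natCast, List.foldl_map, zero_add]
  rw [← nat_loop_eq_pairsList g d l]
  apply PySem.List.foldl_congr_mem
  intro acc k hk
  rw [List.mem_range] at hk
  simp only [PySem.List.pyGetD_natCast]
  rw [PySem.List.foldl_pyRange_pyGetD' l d (fun acc y => g acc (l.getD k d, y)) acc (by omega)]
  norm_num
def Qb (pts : List (Int × Int)) (pq : (Int × Int) × (Int × Int)) : Bool :=
  !(pq.1.1 == pq.2.1 || pq.1.2 == pq.2.2) &&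
    (decide ((pq.2.1, pq.1.2) ∈ pts) && decide ((pq.1.1, pq.2.2) ∈ pts))

theorem zip_pyGetD (A B : List Int) (i : Int) (h : A.length ≤ B.length)
    (h0 : 0 ≤ i) (h1 : i < (A.length : Int)) :
    PySem.List.pyGetD (A.zip B) i (0, 0) = (PySem.List.pyGetD A i 0, PySem.List.pyGetD B i 0) := by
  have hz : (A.zip B).length = A.length := by simp [List.length_zip]; omega
  rw [PySem.List.pyGetD_eq_getElem _ _ h0 (by rw [hz]; exact_mod_cast h1),
      PySem.List.pyGetD_eq_getElem _ _ h0 (by exact_mod_cast h1),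
      PySem.List.pyGetD_eq_getElem _ _ h0 (by omega)]
  exact List.getElem_zip

theorem contains_fold_insert (pts : List (Int × Int)) (z : Int × Int) :
    ((pts.foldl (fun od p => od.insert p 1) (PySem.Dict.empty : PySem.Dict (Int × Int) Int)).contains z)
      = decide (z ∈ pts) := by
  rw [Bool.eq_iff_iff]
  rw [decide_eq_true_eq]
  rw [PySem.Dict.contains_iff_mem_keys]
  rw [PySem.Dict.keys_foldl_insert pts (fun d x => (1 : Int)) PySem.Dict.empty]
  simp [PySem.Dict.keys_empty, PySem.Set.update_nil_left, PySem.Set.mem_ofList]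

theorem count_loop_eq (A B : List Int) (h : A.length ≤ B.length)
    (od : PySem.Dict (Int × Int) Int) :
    (PySem.List.pyRange 0 (PySem.List.len (A.zip B)) 1).foldl (fun c i =>
      (PySem.List.pyRange (i + 1) (PySem.List.len (A.zip B)) 1).foldl (fun c j =>
        if PySem.List.pyGetD A i 0 = PySem.List.pyGetD A j 0 ∨
           PySem.List.pyGetD B i 0 = PySem.List.pyGetD B j 0 then c
        else if od.contains (PySem.List.pyGetD A j 0, PySem.List.pyGetD B i 0) &&
                od.contains (PySem.List.pyGetD A i 0, PySem.List.pyGetD B j 0) then c + 1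
        else c) c) (0 : Int)
    = (pairsList (A.zip B)).foldl (fun c pq =>
        if pq.1.1 = pq.2.1 ∨ pq.1.2 = pq.2.2 then c
        else if od.contains (pq.2.1, pq.1.2) && od.contains (pq.1.1, pq.2.2) then c + 1
        else c) (0 : Int) := by
  rw [← double_index_loop (A.zip B)
    (fun c pq => if pq.1.1 = pq.2.1 ∨ pq.1.2 = pq.2.2 then c
      else if od.contains (pq.2.1, pq.1.2) && od.contains (pq.1.1, pq.2.2) then c + 1
      else c) (0 : Int) ((0 : Int), (0 : Int))]
  apply PySem.List.foldl_congr_mem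
  intro acc i hi
  rw [PySem.List.mem_pyRange_one] at hi
  apply PySem.List.foldl_congr_mem
  intro acc2 j hj
  rw [PySem.List.mem_pyRange_one] at hj
  rw [PySem.List.len_eq] at hi hj
  have hz : (A.zip B).length = A.length := by simp [List.length_zip]; omega
  rw [zip_pyGetD A B i h (by omega) (by omega), zip_pyGetD A B j h (by omega) (by omega)]

theorem countP_of_fold (pts : List (Int × Int)) (od : PySem.Dict (Int × Int) Int)
    (hcont : ∀ z, od.contains z = decide (z ∈ pts)) :
    (pairsList pts).foldl (fun c pq =>
        if pq.1.1 = pq.2.1 ∨ pq.1.2 = pq.2.2 then c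
        else if od.contains (pq.2.1, pq.1.2) && od.contains (pq.1.1, pq.2.2) then c + 1
        else c) (0 : Int) = ((pairsList pts).countP (Qb pts) : Int) := by
  have step : List.foldl (fun c pq =>
        if pq.1.1 = pq.2.1 ∨ pq.1.2 = pq.2.2 then c
        else if od.contains (pq.2.1, pq.1.2) && od.contains (pq.1.1, pq.2.2) then c + 1
        else c) (0 : Int) (pairsList pts)
      = List.foldl (fun c pq => if Qb pts pq then c + 1 else c) (0 : Int) (pairsList pts) := by
    apply PySem.List.foldl_congr_mem
    intro acc pq _
    simp only [hcont, Qb]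
    by_cases h1 : pq.1.1 = pq.2.1 <;> by_cases h2 : pq.1.2 = pq.2.2 <;>
      by_cases h3 : (pq.2.1, pq.1.2) ∈ pts <;> by_cases h4 : (pq.1.1, pq.2.2) ∈ pts <;>
      simp [h1, h2, h3, h4]
  rw [step, PySem.List.foldl_if_add_one]
  simp

theorem solve_eq_countP (A B : List Int) (h : A.length ≤ B.length) :
    solve A B = PySem.Int.floordiv
      (((pairsList (A.zip B)).countP (Qb (A.zip B)) : Nat) : Int) 2 := by
  have hz : (A.zip B).length = A.length := by simp [List.length_zip]; omega
  have hlen : PySem.List.len A = PySem.List.len (A.zip B) := by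
    simp [PySem.List.len_eq, hz]
  simp only [solve]
  rw [hlen]
  have hod : (PySem.List.pyRange 0 (PySem.List.len (A.zip B)) 1).foldl
      (fun od i => od.insert (PySem.List.pyGetD A i 0, PySem.List.pyGetD B i 0) 1)
      (PySem.Dict.empty : PySem.Dict (Int × Int) Int)
      = (A.zip B).foldl (fun od p => od.insert p 1) PySem.Dict.empty := by
    rw [PySem.List.len_eq]
    rw [← PySem.List.foldl_pyRange_zero_pyGetD' (A.zip B) ((0 : Int), (0 : Int))
      (fun od p => od.insert p 1) (PySem.Dict.empty : PySem.Dict (Int × Int) Int)]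
    apply PySem.List.foldl_congr_mem
    intro acc i hi
    rw [PySem.List.mem_pyRange_one] at hi
    rw [zip_pyGetD A B i h hi.1 (by omega)]
  rw [hod]
  rw [count_loop_eq A B h]
  rw [countP_of_fold (A.zip B) _ (contains_fold_insert (A.zip B))]

def ysOf (pts : List (Int × Int)) (x : Int) : List Int :=
  (pts.filter (fun p => p.1 == x)).map (fun p => p.2)

def colsX (pts : List (Int × Int)) : List Int :=
  PySem.Set.ofList (pts.map (fun p => p.1))

def colPairs (pts : List (Int × Int)) (x : Int) : List (Int × Int) :=
  pairsList (PySem.List.sorted (PySem.Set.ofList (ysOf pts x)) (fun y => y) false)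

def bigL (pts : List (Int × Int)) : List (Int × Int) :=
  (colsX pts).flatMap (colPairs pts)

theorem foldl_flatMap {α γ β : Type} (l : List α) (h : α → List γ) (f : β → γ → β) :
    ∀ init : β, l.foldl (fun acc x => (h x).foldl f acc) init = (l.flatMap h).foldl f init := by
  induction l with
  | nil => intro init; simp
  | cons x xs ih => intro init; simp [List.foldl_append, ih]

theorem getD_cols (pts : List (Int × Int)) :
    ∀ (d : PySem.Dict Int (PySem.Set Int)) (x : Int),
    (pts.foldl (fun d p => d.modify p.1 PySem.Set.empty (fun s => PySem.Set.add s p.2)) d).getD x PySem.Set.empty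
      = (ysOf pts x).foldl PySem.Set.add (d.getD x PySem.Set.empty) := by
  induction pts with
  | nil => intro d x; simp [ysOf]
  | cons p ps ih =>
    intro d x
    simp only [List.foldl_cons, ih]
    by_cases hx : p.1 = x
    · simp [ysOf, hx]
    · simp [ysOf, hx, PySem.Dict.getD_modify, Ne.symm hx]

theorem values_cols (pts : List (Int × Int)) :
    (pts.foldl (fun d p => d.modify p.1 PySem.Set.empty (fun s => PySem.Set.add s p.2))
      (PySem.Dict.empty : PySem.Dict Int (PySem.Set Int))).values
      = (colsX pts).map (fun x => PySem.Set.ofList (ysOf pts x)) := by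
  have hkeys : (pts.foldl (fun d p => d.modify p.1 PySem.Set.empty (fun s => PySem.Set.add s p.2))
      (PySem.Dict.empty : PySem.Dict Int (PySem.Set Int))).keys = colsX pts := by
    rw [PySem.Dict.keys_foldl_modify_key pts (fun p => p.1) PySem.Set.empty
      (fun d p s => PySem.Set.add s p.2) PySem.Dict.empty]
    simp [PySem.Dict.keys_empty, PySem.Set.update_nil_left, colsX]
  have hnd : (pts.foldl (fun d p => d.modify p.1 PySem.Set.empty (fun s => PySem.Set.add s p.2))
      (PySem.Dict.empty : PySem.Dict Int (PySem.Set Int))).keys.Nodup := by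
    apply PySem.Dict.nodup_keys_foldl_modify_key pts (fun p => p.1) PySem.Set.empty
      (fun d p s => PySem.Set.add s p.2) PySem.Dict.empty
    simp [PySem.Dict.keys_empty]
  rw [PySem.Dict.values_eq_map_keys _ hnd PySem.Set.empty, hkeys]
  apply List.map_congr_left
  intro x _
  rw [getD_cols pts PySem.Dict.empty x]
  simp [PySem.Dict.getD_empty, PySem.Set.ofList_eq_foldl, PySem.Set.empty]

theorem halfterm (c : Nat) :
    PySem.Int.floordiv ((c : Int) * ((c : Int) - 1)) 2 = ((c * (c - 1) / 2 : Nat) : Int) := by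
  cases c with
  | zero => decide
  | succ m =>
    have h1 : ((m + 1 : Nat) : Int) * (((m + 1 : Nat) : Int) - 1) = (((m + 1) * m : Nat) : Int) := by
      push_cast; ring
    have h2 : (m + 1) * ((m + 1) - 1) = (m + 1) * m := by simp
    rw [h1, h2]
    exact_mod_cast PySem.Int.floordiv_natCast ((m + 1) * m) 2

theorem solve_alt_eq (A B : List Int) :
    solve_alt A B = ((PySem.Set.ofList (bigL (A.zip B))).map
      (fun k => (((bigL (A.zip B)).count k * ((bigL (A.zip B)).count k - 1) / 2 : Nat) : Int))).sum := by
  simp only [solve_alt]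
  rw [values_cols]
  have hloop : ∀ (pc : PySem.Dict (Int × Int) Int) (ys : PySem.Set Int),
      (PySem.List.pyRange 0 (PySem.List.len (PySem.List.sorted ys (fun y => y) false)) 1).foldl
        (fun pc i => (PySem.List.pyRange (i + 1)
            (PySem.List.len (PySem.List.sorted ys (fun y => y) false)) 1).foldl
          (fun pc j => pc.insert
              (PySem.List.pyGetD (PySem.List.sorted ys (fun y => y) false) i 0,
               PySem.List.pyGetD (PySem.List.sorted ys (fun y => y) false) j 0)
              (pc.getD (PySem.List.pyGetD (PySem.List.sorted ys (fun y => y) false) i 0,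
               PySem.List.pyGetD (PySem.List.sorted ys (fun y => y) false) j 0) 0 + 1)) pc) pc
      = (pairsList (PySem.List.sorted ys (fun y => y) false)).foldl
          (fun pc p => pc.insert p (pc.getD p 0 + 1)) pc := by
    intro pc ys
    exact double_index_loop (PySem.List.sorted ys (fun y => y) false)
      (fun pc p => pc.insert p (pc.getD p 0 + 1)) pc 0
  have step := PySem.List.foldl_congr_mem
    (l := (colsX (A.zip B)).map (fun x => PySem.Set.ofList (ysOf (A.zip B) x)))
    _
    (fun (pc : PySem.Dict (Int × Int) Int) (ys : PySem.Set Int) =>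
      (pairsList (PySem.List.sorted ys (fun y => y) false)).foldl
        (fun pc p => pc.insert p (pc.getD p 0 + 1)) pc)
    (PySem.Dict.empty : PySem.Dict (Int × Int) Int)
    (fun pc ys _ => hloop pc ys)
  rw [step]
  rw [foldl_flatMap, List.flatMap_map]
  have : ((colsX (A.zip B)).flatMap
      (fun x => pairsList (PySem.List.sorted (PySem.Set.ofList (ysOf (A.zip B) x)) (fun y => y) false)))
      = bigL (A.zip B) := rfl
  rw [this, PySem.Dict.foldl_insert_getD_add_one_eq_counter]
  rw [PySem.List.foldl_add]
  have hv : (PySem.Dict.counter (bigL (A.zip B))).values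
      = (PySem.Set.ofList (bigL (A.zip B))).map (fun k => (((bigL (A.zip B)).count k : Nat) : Int)) := by
    show ((PySem.Dict.counter (bigL (A.zip B))).items).map (fun p => p.2) = _
    rw [PySem.Dict.items_counter]
    simp [List.map_map, Function.comp]
  rw [hv, List.map_map]
  have : (0 : Int) + ((PySem.Set.ofList (bigL (A.zip B))).map
      ((fun c => PySem.Int.floordiv (c * (c - 1)) 2) ∘
        (fun k => (((bigL (A.zip B)).count k : Nat) : Int)))).sum
      = ((PySem.Set.ofList (bigL (A.zip B))).map
        (fun k => (((bigL (A.zip B)).count k * ((bigL (A.zip B)).count k - 1) / 2 : Nat) : Int))).sum := by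
    rw [zero_add]
    congr 1
    apply List.map_congr_left
    intro k _
    exact halfterm _
  exact this

theorem sum_map_ite_one_zero_nat {α : Type} (l : List α) (p : α → Bool) :
    (l.map (fun a => if p a then 1 else 0)).sum = l.countP p := by
  induction l with
  | nil => simp
  | cons x t ih => simp [List.countP_cons, ih]; omega

def ordCount {α : Type} (l : List α) (f : α → α → Bool) : Nat :=
  (l.map (fun a => l.countP (fun b => f a b))).sum

theorem ordCount_eq_two_mul_pairs {α : Type} (f : α → α → Bool)
    (hsymm : ∀ a b, f a b = f b a) (hirr : ∀ a, f a a = false) :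
    ∀ l : List α, ordCount l f = 2 * (pairsList l).countP (fun pq => f pq.1 pq.2)
  | [] => by simp [ordCount, pairsList]
  | x :: t => by
    have ih := ordCount_eq_two_mul_pairs f hsymm hirr t
    have hpc : (t.map (fun y => (x, y))).countP (fun pq => f pq.1 pq.2) = t.countP (fun b => f x b) := by
      rw [List.countP_map]; rfl
    have hite : (t.map (fun a => if f a x then 1 else 0)).sum = t.countP (fun a => f a x) :=
      sum_map_ite_one_zero_nat t _
    have hsw : t.countP (fun a => f a x) = t.countP (fun b => f x b) :=
      List.countP_congr (fun a _ => by rw [hsymm])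
    have hmap2 : (t.map (fun a => (x :: t).countP (fun b => f a b))).sum
        = (t.map (fun a => t.countP (fun b => f a b))).sum
          + (t.map (fun a => if f a x then 1 else 0)).sum := by
      rw [← List.sum_map_add]
      congr 1
      apply List.map_congr_left
      intro a _
      rw [List.countP_cons]
    have hhead : (x :: t).countP (fun b => f x b) = t.countP (fun b => f x b) := by
      rw [List.countP_cons, hirr]
      simp
    have hrhs : (pairsList (x :: t)).countP (fun pq => f pq.1 pq.2)
        = t.countP (fun b => f x b) + (pairsList t).countP (fun pq => f pq.1 pq.2) := by
      show ((t.map (fun y => (x, y)) ++ pairsList t).countP (fun pq => f pq.1 pq.2)) = _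
      rw [List.countP_append, hpc]
    show ((x :: t).map (fun a => (x :: t).countP (fun b => f a b))).sum = _
    rw [List.map_cons, List.sum_cons, hmap2, hhead, hite, hsw, hrhs]
    unfold ordCount at ih
    omega

theorem countP_nodup_toFinset {α : Type} [DecidableEq α] (l : List α) (hl : l.Nodup) (p : α → Bool) :
    l.countP p = (l.toFinset.filter (fun a => p a)).card := by
  rw [← List.toFinset_filter, List.toFinset_card_of_nodup (hl.filter p),
    List.countP_eq_length_filter]

theorem ordCount_eq_card {α : Type} [DecidableEq α] (l : List α) (hl : l.Nodup) (f : α → α → Bool) :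
    ordCount l f = ((l.toFinset ×ˢ l.toFinset).filter (fun pq => f pq.1 pq.2)).card := by
  rw [Finset.card_filter, Finset.sum_product, ordCount, ← List.sum_toFinset _ hl]
  apply Finset.sum_congr rfl
  intro a _
  rw [countP_nodup_toFinset l hl, Finset.card_filter]

def RectF (pts : List (Int × Int)) : Finset ((Int × Int) × (Int × Int)) :=
  (pts.toFinset ×ˢ pts.toFinset).filter (fun q =>
    q.1.1 < q.2.1 ∧ q.1.2 < q.2.2 ∧ (q.1.1, q.2.2) ∈ pts.toFinset ∧ (q.2.1, q.1.2) ∈ pts.toFinset)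

theorem mem_RectF (pts : List (Int × Int)) (q : (Int × Int) × (Int × Int)) :
    q ∈ RectF pts ↔ q.1 ∈ pts ∧ q.2 ∈ pts ∧ q.1.1 < q.2.1 ∧ q.1.2 < q.2.2 ∧
      (q.1.1, q.2.2) ∈ pts ∧ (q.2.1, q.1.2) ∈ pts := by
  simp [RectF, Finset.mem_filter, Finset.mem_product, List.mem_toFinset]
  tauto

theorem mem_Fset (pts : List (Int × Int)) (pq : (Int × Int) × (Int × Int)) :
    pq ∈ (pts.toFinset ×ˢ pts.toFinset).filter (fun pq => Qb pts pq) ↔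
      pq.1 ∈ pts ∧ pq.2 ∈ pts ∧ pq.1.1 ≠ pq.2.1 ∧ pq.1.2 ≠ pq.2.2 ∧
      (pq.2.1, pq.1.2) ∈ pts ∧ (pq.1.1, pq.2.2) ∈ pts := by
  simp [Qb, Finset.mem_filter, Finset.mem_product, List.mem_toFinset]
  tauto

theorem cardF_eq (pts : List (Int × Int)) :
    ((pts.toFinset ×ˢ pts.toFinset).filter (fun pq => Qb pts pq)).card = 4 * (RectF pts).card := by
  set F := (pts.toFinset ×ˢ pts.toFinset).filter (fun pq => Qb pts pq) with hF
  have hmemF : ∀ pq, pq ∈ F ↔ pq.1 ∈ pts ∧ pq.2 ∈ pts ∧ pq.1.1 ≠ pq.2.1 ∧ pq.1.2 ≠ pq.2.2 ∧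
      (pq.2.1, pq.1.2) ∈ pts ∧ (pq.1.1, pq.2.2) ∈ pts := fun pq => by rw [hF]; exact mem_Fset pts pq
  have hs1 := Finset.card_filter_add_card_filter_not (s := F) (fun pq => pq.1.1 < pq.2.1)
  have hs2 := Finset.card_filter_add_card_filter_not (s := F.filter (fun pq => pq.1.1 < pq.2.1))
    (fun pq => pq.1.2 < pq.2.2)
  have hs3 := Finset.card_filter_add_card_filter_not (s := F.filter (fun pq => ¬ pq.1.1 < pq.2.1))
    (fun pq => pq.1.2 < pq.2.2)
  have e1 : ((F.filter (fun pq => pq.1.1 < pq.2.1)).filter (fun pq => pq.1.2 < pq.2.2)).card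
      = (RectF pts).card := by
    congr 1
    apply Finset.ext
    intro q
    rw [Finset.mem_filter, Finset.mem_filter, hmemF, mem_RectF]
    constructor
    · rintro ⟨⟨⟨h1, h2, h3, h4, h5, h6⟩, h7⟩, h8⟩
      exact ⟨h1, h2, h7, h8, h6, h5⟩
    · rintro ⟨h1, h2, h3, h4, h5, h6⟩
      exact ⟨⟨⟨h1, h2, ne_of_lt h3, ne_of_lt h4, h6, h5⟩, h3⟩, h4⟩
  have e2 : ((F.filter (fun pq => pq.1.1 < pq.2.1)).filter (fun pq => ¬ pq.1.2 < pq.2.2)).card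
      = (RectF pts).card := by
    apply Finset.card_nbij' (i := fun pq => ((pq.1.1, pq.2.2), (pq.2.1, pq.1.2)))
      (j := fun q => ((q.1.1, q.2.2), (q.2.1, q.1.2)))
    · intro pq hpq
      simp only [Finset.coe_filter, Set.mem_setOf_eq, Finset.mem_filter, hmemF] at hpq
      obtain ⟨⟨⟨h1, h2, h3, h4, h5, h6⟩, h7⟩, h8⟩ := hpq
      simp only [Finset.mem_coe, mem_RectF]
      exact ⟨h6, h5, h7, by omega, h1, h2⟩
    · intro q hq
      simp only [Finset.mem_coe, mem_RectF] at hq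
      obtain ⟨h1, h2, h3, h4, h5, h6⟩ := hq
      simp only [Finset.coe_filter, Set.mem_setOf_eq, Finset.mem_filter, hmemF]
      exact ⟨⟨⟨h5, h6, by omega, by omega, h2, h1⟩, h3⟩, by omega⟩
    · intro pq _
      simp
    · intro q _
      simp
  have e3 : ((F.filter (fun pq => ¬ pq.1.1 < pq.2.1)).filter (fun pq => pq.1.2 < pq.2.2)).card
      = (RectF pts).card := by
    apply Finset.card_nbij' (i := fun pq => ((pq.2.1, pq.1.2), (pq.1.1, pq.2.2)))
      (j := fun q => ((q.2.1, q.1.2), (q.1.1, q.2.2)))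
    · intro pq hpq
      simp only [Finset.coe_filter, Set.mem_setOf_eq, Finset.mem_filter, hmemF] at hpq
      obtain ⟨⟨⟨h1, h2, h3, h4, h5, h6⟩, h7⟩, h8⟩ := hpq
      simp only [Finset.mem_coe, mem_RectF]
      exact ⟨h5, h6, by omega, h8, h2, h1⟩
    · intro q hq
      simp only [Finset.mem_coe, mem_RectF] at hq
      obtain ⟨h1, h2, h3, h4, h5, h6⟩ := hq
      simp only [Finset.coe_filter, Set.mem_setOf_eq, Finset.mem_filter, hmemF]
      exact ⟨⟨⟨h6, h5, by omega, by omega, h1, h2⟩, by omega⟩, h4⟩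
    · intro pq _
      simp
    · intro q _
      simp
  have e4 : ((F.filter (fun pq => ¬ pq.1.1 < pq.2.1)).filter (fun pq => ¬ pq.1.2 < pq.2.2)).card
      = (RectF pts).card := by
    apply Finset.card_nbij' (i := fun pq => (pq.2, pq.1)) (j := fun q => (q.2, q.1))
    · intro pq hpq
      simp only [Finset.coe_filter, Set.mem_setOf_eq, Finset.mem_filter, hmemF] at hpq
      obtain ⟨⟨⟨h1, h2, h3, h4, h5, h6⟩, h7⟩, h8⟩ := hpq
      simp only [Finset.mem_coe, mem_RectF]
      refine ⟨h2, h1, by omega, by omega, ?_, ?_⟩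
      · simpa using h5
      · simpa using h6
    · intro q hq
      simp only [Finset.mem_coe, mem_RectF] at hq
      obtain ⟨h1, h2, h3, h4, h5, h6⟩ := hq
      simp only [Finset.coe_filter, Set.mem_setOf_eq, Finset.mem_filter, hmemF]
      refine ⟨⟨⟨h2, h1, by omega, by omega, ?_, ?_⟩, by omega⟩, by omega⟩
      · simpa using h5
      · simpa using h6
    · intro pq _
      simp
    · intro q _
      simp
  omega

theorem Qb_symm (pts : List (Int × Int)) (a b : Int × Int) :
    Qb pts (a, b) = Qb pts (b, a) := by
  rw [Bool.eq_iff_iff]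
  simp only [Qb, Bool.and_eq_true, Bool.not_eq_true', Bool.or_eq_false_iff,
    beq_eq_false_iff_ne, decide_eq_true_eq]
  constructor
  · rintro ⟨⟨h1, h2⟩, h3, h4⟩
    exact ⟨⟨h1.symm, h2.symm⟩, h4, h3⟩
  · rintro ⟨⟨h1, h2⟩, h3, h4⟩
    exact ⟨⟨h1.symm, h2.symm⟩, h4, h3⟩

theorem Qb_irrefl (pts : List (Int × Int)) (a : Int × Int) : Qb pts (a, a) = false := by
  simp [Qb]

theorem core1 (pts : List (Int × Int)) (hnd : pts.Nodup) :
    (pairsList pts).countP (Qb pts) = 2 * (RectF pts).card := by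
  have h1 : ordCount pts (fun p q => Qb pts (p, q))
      = 2 * (pairsList pts).countP (Qb pts) :=
    ordCount_eq_two_mul_pairs (fun p q => Qb pts (p, q))
      (fun a b => Qb_symm pts a b) (fun a => Qb_irrefl pts a) pts
  have h2 : ordCount pts (fun p q => Qb pts (p, q))
      = ((pts.toFinset ×ˢ pts.toFinset).filter (fun pq => Qb pts pq)).card :=
    ordCount_eq_card pts hnd (fun p q => Qb pts (p, q))
  rw [cardF_eq] at h2
  omega

theorem mem_of_mem_pairsList {α : Type} : ∀ {l : List α} {p : α × α},
    p ∈ pairsList l → p.1 ∈ l ∧ p.2 ∈ l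
  | x :: t, p, hp => by
    simp only [pairsList, List.mem_append, List.mem_map] at hp
    rcases hp with ⟨y, hy, rfl⟩ | hp
    · exact ⟨List.mem_cons_self, List.mem_cons_of_mem _ hy⟩
    · have := mem_of_mem_pairsList hp
      exact ⟨List.mem_cons_of_mem _ this.1, List.mem_cons_of_mem _ this.2⟩

theorem mem_pairsList_of_pairwise_lt : ∀ (l : List Int), l.Pairwise (· < ·) → ∀ a b : Int,
    ((a, b) ∈ pairsList l ↔ a ∈ l ∧ b ∈ l ∧ a < b)
  | [], _, a, b => by simp [pairsList]
  | x :: t, hp, a, b => by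
    have hx : ∀ y ∈ t, x < y := fun y hy => (List.pairwise_cons.mp hp).1 y hy
    have ht : t.Pairwise (· < ·) := (List.pairwise_cons.mp hp).2
    have ih := mem_pairsList_of_pairwise_lt t ht a b
    simp only [pairsList, List.mem_append, List.mem_map, List.mem_cons]
    constructor
    · rintro (⟨y, hy, heq⟩ | hmem)
      · cases heq
        exact ⟨Or.inl rfl, Or.inr hy, hx _ hy⟩
      · have := ih.mp hmem
        exact ⟨Or.inr this.1, Or.inr this.2.1, this.2.2⟩
    · rintro ⟨ha, hb, hab⟩
      rcases ha with rfl | ha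
      · rcases hb with rfl | hb
        · omega
        · exact Or.inl ⟨b, hb, rfl⟩
      · rcases hb with rfl | hb
        · have := hx a ha; omega
        · exact Or.inr (ih.mpr ⟨ha, hb, hab⟩)

theorem nodup_pairsList_of_pairwise_lt : ∀ (l : List Int), l.Pairwise (· < ·) →
    (pairsList l).Nodup
  | [], _ => by simp [pairsList]
  | x :: t, hp => by
    have hx : ∀ y ∈ t, x < y := fun y hy => (List.pairwise_cons.mp hp).1 y hy
    have ht : t.Pairwise (· < ·) := (List.pairwise_cons.mp hp).2
    have ih := nodup_pairsList_of_pairwise_lt t ht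
    have htnd : t.Nodup := ht.imp (fun h => ne_of_lt h)
    simp only [pairsList]
    apply List.Nodup.append
    · exact htnd.map (fun y z h => by cases h; rfl)
    · exact ih
    · intro p hp1 hp2
      simp only [List.mem_map] at hp1
      obtain ⟨y, hy, rfl⟩ := hp1
      have := (mem_of_mem_pairsList hp2).1
      exact absurd (hx x this) (lt_irrefl x)

theorem count_flatMap_nat {α β : Type} [BEq β] (ls : List α) (g : α → List β) (a : β) :
    (ls.flatMap g).count a = (ls.map (fun x => (g x).count a)).sum := by
  induction ls with
  | nil => simp
  | cons x t ih => simp [List.flatMap_cons, List.count_append, ih]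

theorem mem_ysOf (pts : List (Int × Int)) (x y : Int) :
    y ∈ ysOf pts x ↔ (x, y) ∈ pts := by
  simp only [ysOf, List.mem_map, List.mem_filter, beq_iff_eq]
  constructor
  · rintro ⟨p, ⟨hp, rfl⟩, rfl⟩
    exact hp
  · intro h
    exact ⟨(x, y), ⟨h, rfl⟩, rfl⟩

theorem colSorted_pairwise (pts : List (Int × Int)) (x : Int) :
    (PySem.List.sorted (PySem.Set.ofList (ysOf pts x)) (fun y => y) false).Pairwise (· < ·) :=
  PySem.List.sorted_ofList_pairwise_lt (ysOf pts x)

theorem mem_colSorted (pts : List (Int × Int)) (x y : Int) :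
    y ∈ PySem.List.sorted (PySem.Set.ofList (ysOf pts x)) (fun y => y) false ↔ (x, y) ∈ pts := by
  rw [PySem.List.mem_sorted, PySem.Set.mem_ofList, mem_ysOf]

theorem mem_colPairs (pts : List (Int × Int)) (x : Int) (k : Int × Int) :
    k ∈ colPairs pts x ↔ (x, k.1) ∈ pts ∧ (x, k.2) ∈ pts ∧ k.1 < k.2 := by
  have h := mem_pairsList_of_pairwise_lt _ (colSorted_pairwise pts x) k.1 k.2
  rw [colPairs, show k = (k.1, k.2) from rfl, h, mem_colSorted, mem_colSorted]

theorem count_colPairs (pts : List (Int × Int)) (x : Int) (k : Int × Int) :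
    (colPairs pts x).count k
      = if (x, k.1) ∈ pts ∧ (x, k.2) ∈ pts ∧ k.1 < k.2 then 1 else 0 := by
  by_cases h : (x, k.1) ∈ pts ∧ (x, k.2) ∈ pts ∧ k.1 < k.2
  · rw [if_pos h]
    exact List.count_eq_one_of_mem
      (nodup_pairsList_of_pairwise_lt _ (colSorted_pairwise pts x))
      ((mem_colPairs pts x k).mpr h)
  · rw [if_neg h, List.count_eq_zero]
    rw [mem_colPairs]
    exact h

theorem count_bigL (pts : List (Int × Int)) (k : Int × Int) :
    (bigL pts).count k
      = (colsX pts).countP (fun x => decide ((x, k.1) ∈ pts ∧ (x, k.2) ∈ pts ∧ k.1 < k.2)) := by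
  rw [bigL, count_flatMap_nat]
  rw [← sum_map_ite_one_zero_nat]
  congr 1
  apply List.map_congr_left
  intro x _
  rw [count_colPairs]
  simp only [decide_eq_true_eq]

theorem mem_bigL (pts : List (Int × Int)) (k : Int × Int) :
    k ∈ bigL pts ↔ ∃ x, x ∈ pts.map Prod.fst ∧ (x, k.1) ∈ pts ∧ (x, k.2) ∈ pts ∧ k.1 < k.2 := by
  simp only [bigL, List.mem_flatMap, mem_colPairs, colsX, PySem.Set.mem_ofList]

theorem two_mul_filter_lt (M : Finset Int) :
    2 * ((M ×ˢ M).filter (fun ab => ab.1 < ab.2)).card = M.card * (M.card - 1) := by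
  have hswap : ((M ×ˢ M).filter (fun ab => ab.1 < ab.2)).card
      = ((M ×ˢ M).filter (fun ab => ab.2 < ab.1)).card := by
    apply Finset.card_nbij' (i := fun ab => (ab.2, ab.1)) (j := fun ab => (ab.2, ab.1))
    · intro ab h
      simp only [Finset.coe_filter, Set.mem_setOf_eq, Finset.mem_product] at h ⊢
      tauto
    · intro ab h
      simp only [Finset.coe_filter, Set.mem_setOf_eq, Finset.mem_product] at h ⊢
      tauto
    · intro ab _; simp
    · intro ab _; simp
  have hsplit := Finset.card_filter_add_card_filter_not (s := M.offDiag) (fun ab => ab.1 < ab.2)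
  have hlt : (M.offDiag.filter (fun ab => ab.1 < ab.2))
      = ((M ×ˢ M).filter (fun ab => ab.1 < ab.2)) := by
    apply Finset.ext
    intro ab
    simp only [Finset.mem_filter, Finset.mem_offDiag, Finset.mem_product]
    constructor
    · rintro ⟨⟨h1, h2, _⟩, h4⟩
      exact ⟨⟨h1, h2⟩, h4⟩
    · rintro ⟨⟨h1, h2⟩, h4⟩
      exact ⟨⟨h1, h2, by omega⟩, h4⟩
  have hgt : (M.offDiag.filter (fun ab => ¬ ab.1 < ab.2))
      = ((M ×ˢ M).filter (fun ab => ab.2 < ab.1)) := by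
    apply Finset.ext
    intro ab
    simp only [Finset.mem_filter, Finset.mem_offDiag, Finset.mem_product]
    constructor
    · rintro ⟨⟨h1, h2, h3⟩, h4⟩
      refine ⟨⟨h1, h2⟩, ?_⟩
      rcases lt_trichotomy ab.1 ab.2 with h | h | h
      · omega
      · exact absurd h h3
      · exact h
    · rintro ⟨⟨h1, h2⟩, h4⟩
      exact ⟨⟨h1, h2, by omega⟩, by omega⟩
  have hod := Finset.offDiag_card M
  have hmm : M.card * M.card - M.card = M.card * (M.card - 1) := by
    cases hM : M.card with
    | zero => simp
    | succ m => simp [Nat.succ_mul, Nat.mul_succ]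
  rw [hlt, hgt] at hsplit
  omega

def Mcol (pts : List (Int × Int)) (k : Int × Int) : Finset Int :=
  ((pts.map (fun p => p.1)).toFinset).filter (fun x => (x, k.1) ∈ pts ∧ (x, k.2) ∈ pts)

theorem count_bigL_card (pts : List (Int × Int)) (k : Int × Int) (hk : k.1 < k.2) :
    (bigL pts).count k = (Mcol pts k).card := by
  rw [count_bigL]
  have hcong : (colsX pts).countP (fun x => decide ((x, k.1) ∈ pts ∧ (x, k.2) ∈ pts ∧ k.1 < k.2))
      = (colsX pts).countP (fun x => decide ((x, k.1) ∈ pts ∧ (x, k.2) ∈ pts)) := by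
    apply List.countP_congr
    intro x _
    simp only [decide_eq_true_eq]
    constructor
    · tauto
    · tauto
  rw [hcong, countP_nodup_toFinset (colsX pts) (by rw [colsX]; exact PySem.Set.nodup_ofList _)]
  have hts : (colsX pts).toFinset = (pts.map (fun p => p.1)).toFinset := by
    apply Finset.ext
    intro x
    simp [colsX, List.mem_toFinset, PySem.Set.mem_ofList]
  rw [hts, Mcol]
  congr 1
  apply Finset.filter_congr
  intro x _
  simp

theorem fiber_card (pts : List (Int × Int)) (k : Int × Int) (hk : k.1 < k.2) :
    ((RectF pts).filter (fun q => (q.1.2, q.2.2) = k)).card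
      = ((Mcol pts k ×ˢ Mcol pts k).filter (fun ab => ab.1 < ab.2)).card := by
  apply Finset.card_nbij' (i := fun q => (q.1.1, q.2.1)) (j := fun ab => ((ab.1, k.1), (ab.2, k.2)))
  · intro q hq
    simp only [Finset.coe_filter, Set.mem_setOf_eq, mem_RectF] at hq
    obtain ⟨⟨h1, h2, h3, h4, h5, h6⟩, hfib⟩ := hq
    obtain ⟨hk1, hk2⟩ : q.1.2 = k.1 ∧ q.2.2 = k.2 := Prod.mk.injEq .. ▸ Prod.ext_iff.mp hfib
    simp only [Finset.coe_filter, Set.mem_setOf_eq, Finset.mem_filter, Finset.mem_product,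
      Mcol, List.mem_toFinset, List.mem_map]
    refine ⟨⟨⟨⟨q.1, h1, rfl⟩, ?_, ?_⟩, ⟨q.2, h2, rfl⟩, ?_, ?_⟩, h3⟩
    · rw [← hk1]; exact h1
    · rw [← hk2]; exact h5
    · rw [← hk1]; exact h6
    · rw [← hk2]; exact h2
  · intro ab hab
    simp only [Finset.coe_filter, Set.mem_setOf_eq, Finset.mem_filter, Finset.mem_product,
      Mcol, List.mem_toFinset] at hab
    obtain ⟨⟨⟨_, ha1, ha2⟩, _, hb1, hb2⟩, hlt⟩ := hab
    simp only [Finset.coe_filter, Set.mem_setOf_eq, mem_RectF]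
    exact ⟨⟨ha1, hb2, hlt, hk, ha2, hb1⟩, by simp⟩
  · intro q hq
    simp only [Finset.coe_filter, Set.mem_setOf_eq] at hq
    obtain ⟨_, hfib⟩ := hq
    obtain ⟨hk1, hk2⟩ : q.1.2 = k.1 ∧ q.2.2 = k.2 := Prod.mk.injEq .. ▸ Prod.ext_iff.mp hfib
    simp [← hk1, ← hk2]
  · intro ab _
    simp

theorem core2 (pts : List (Int × Int)) :
    ((PySem.Set.ofList (bigL pts)).map
      (fun k => (bigL pts).count k * ((bigL pts).count k - 1))).sum
      = 2 * (RectF pts).card := by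
  have hknd : (PySem.Set.ofList (bigL pts)).Nodup := PySem.Set.nodup_ofList _
  have hmapsto : ∀ q ∈ RectF pts,
      (fun q => (q.1.2, q.2.2)) q ∈ (PySem.Set.ofList (bigL pts)).toFinset := by
    intro q hq
    rw [mem_RectF] at hq
    rw [List.mem_toFinset, PySem.Set.mem_ofList, mem_bigL]
    exact ⟨q.1.1, List.mem_map.mpr ⟨q.1, hq.1, rfl⟩, hq.1, hq.2.2.2.2.1, hq.2.2.2.1⟩
  have hfib := Finset.card_eq_sum_card_fiberwise (f := fun q => (q.1.2, q.2.2))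
    (s := RectF pts) (t := (PySem.Set.ofList (bigL pts)).toFinset)
    (fun q hq => hmapsto q hq)
  rw [← List.sum_toFinset _ hknd]
  have hpt : ∀ k ∈ (PySem.Set.ofList (bigL pts)).toFinset,
      (bigL pts).count k * ((bigL pts).count k - 1)
        = 2 * ((RectF pts).filter (fun q => (fun q => (q.1.2, q.2.2)) q = k)).card := by
    intro k hk
    have hk12 : k.1 < k.2 := by
      rw [List.mem_toFinset, PySem.Set.mem_ofList, mem_bigL] at hk
      obtain ⟨x, _, _, _, h⟩ := hk
      exact h
    rw [count_bigL_card pts k hk12, ← two_mul_filter_lt, ← fiber_card pts k hk12]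
  rw [Finset.sum_congr rfl hpt, ← Finset.mul_sum, ← hfib]

theorem two_dvd_mul_pred (c : Nat) : 2 ∣ c * (c - 1) := by
  cases c with
  | zero => simp
  | succ m =>
    have h := Nat.even_mul_succ_self m
    have : (m + 1) * (m + 1 - 1) = m * (m + 1) := by
      simp [Nat.mul_comm]
    rw [this]
    exact h.two_dvd

theorem sum_halves {α : Type} (f : α → Nat) :
    ∀ l : List α, (∀ a ∈ l, 2 ∣ f a) → (l.map (fun a => f a / 2)).sum = (l.map f).sum / 2
  | [], _ => by simp
  | x :: t, h => by
    have ih := sum_halves f t (fun a ha => h a (List.mem_cons_of_mem _ ha))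
    have hx := h x List.mem_cons_self
    have ht : 2 ∣ (t.map f).sum := by
      apply List.dvd_sum
      intro y hy
      obtain ⟨a, ha, rfl⟩ := List.mem_map.mp hy
      exact h a (List.mem_cons_of_mem _ ha)
    simp only [List.map_cons, List.sum_cons, ih]
    omega

theorem cast_sum_map {α : Type} (f : α → Nat) :
    ∀ l : List α, (l.map (fun a => ((f a : Nat) : Int))).sum = (((l.map f).sum : Nat) : Int)
  | [] => by simp
  | x :: t => by simp [cast_sum_map f t]

theorem main_eq (A B : List Int) (h : A.length ≤ B.length) (hnd : (A.zip B).Nodup) :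
    solve A B = solve_alt A B := by
  rw [solve_eq_countP A B h, solve_alt_eq A B]
  rw [core1 (A.zip B) hnd]
  have ha : PySem.Int.floordiv ((2 * (RectF (A.zip B)).card : Nat) : Int) 2
      = (((RectF (A.zip B)).card : Nat) : Int) := by
    have := PySem.Int.floordiv_natCast (2 * (RectF (A.zip B)).card) 2
    rw [show ((2 : Nat) : Int) = (2 : Int) from rfl] at this
    rw [this]
    congr 1
    omega
  rw [ha]
  rw [cast_sum_map]
  rw [sum_halves _ _ (fun k _ => two_dvd_mul_pred _)]
  rw [core2 (A.zip B)]
  congr 1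
  omega

-- ===== VERDICT (by name: the statement is the Claim_ definition above) =====
theorem solve_spec : Claim_equal_solve := by
  intro A B _ hpre
  exact main_eq A B hpre.1 hpre.2
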